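-- pv_equiv track=rewrite | github.com/ChandruMIT-o/Tournament-of-Strategies-MIT | strategies/howk.py | howk
-- ===== SOURCE A (Python) =====
-- def howk(own, opp):
--     def alternating_booleans(length):
--       true_block = 1
--       false_block = 1
--       result = []
--       cycle = 0
--       temp = 0
--       while len(result) < length:
--
--         result.extend([False] * (false_block + cycle))
--         result.extend([True] * true_block)
--
--         if temp%2 == 1:
--             false_block = 1
--         else:
--             false_block = 3
--
--         temp += 1
--       return result[:length]
--     length = len(own)
--
--     return alternating_booleans(length+1)[-1]
-- ===== SOURCE B (Python) =====
-- def howk(own, opp):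
--     # The generated pattern is periodic with period 6: F T F F F T ...
--     # Element at index len(own) is True exactly when len(own) % 6 is 1 or 5.
--     return len(own) % 6 in (1, 5)
-- ===== Notes on version B (the rewrite author's own statement) =====
-- stated objective: faster
-- what changed: B replaces the while loop that materialises the whole boolean pattern with the closed form len(own) % 6 in {1,5}, since the generated pattern is periodic with period 6.
import Mathlib
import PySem

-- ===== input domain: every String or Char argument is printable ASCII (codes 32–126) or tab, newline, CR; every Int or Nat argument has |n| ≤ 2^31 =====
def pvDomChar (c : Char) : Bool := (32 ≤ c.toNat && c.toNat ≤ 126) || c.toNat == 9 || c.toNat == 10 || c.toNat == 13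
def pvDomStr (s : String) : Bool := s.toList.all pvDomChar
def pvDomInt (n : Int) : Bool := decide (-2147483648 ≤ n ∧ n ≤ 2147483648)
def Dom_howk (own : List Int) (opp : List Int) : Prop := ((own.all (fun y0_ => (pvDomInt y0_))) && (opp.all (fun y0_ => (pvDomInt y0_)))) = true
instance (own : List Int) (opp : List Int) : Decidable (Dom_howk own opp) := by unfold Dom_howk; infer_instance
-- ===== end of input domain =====

-- B replaces A's pattern-building while loop with the O(1) closed form len(own) % 6 ∈ {1,5} (the pattern is 6-periodic).


-- ===== PORT A =====
-- the inner while loop of alternating_booleans; A never changes cycle, so it stays a parameter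
def howkLoop (length : Nat) (result : List Bool) (false_block : Nat) (cycle : Nat) (temp : Nat) :
    List Bool :=
  if result.length < length then
    howkLoop length
      (result ++ List.replicate (false_block + cycle) false ++ List.replicate 1 true)
      (if temp % 2 = 1 then 1 else 3) cycle (temp + 1)
  else result
termination_by length - result.length
decreasing_by simp; omega

def howk (own : List Int) (opp : List Int) : Bool :=
  let length := own.length
  let res := howkLoop (length + 1) [] 1 0 0
  -- result[:length][-1]; the loop only stops with ≥ length+1 elements, so the index is in range
  (PySem.List.pyGet? (PySem.List.slice res none (some ((length : Int) + 1))) (-1)).getD false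

-- ===== PORT B =====
def howk_alt (own : List Int) (opp : List Int) : Bool :=
  [(1 : Int), 5].contains ((own.length : Int) % 6)

-- ===== PRECONDITION & SPEC =====
def Spec_howk (own : List Int) (opp : List Int) (out : Bool) : Prop := out = howk_alt own opp
instance (own : List Int) (opp : List Int) (out : Bool) : Decidable (Spec_howk own opp out) := by unfold Spec_howk; infer_instance

-- ===== CLAIM (what is proved, stated in full; the proofs are below) =====
def Claim_equal_howk : Prop := ∀ (own : List Int) (opp : List Int), Dom_howk own opp → Spec_howk own opp (howk own opp)

-- ===== LEMMAS AND PROOFS =====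

-- value of the 6-periodic pattern at index n
def pat (n : Nat) : Bool := decide (n % 6 = 1 ∨ n % 6 = 5)

theorem howkLoop_spec (k : Nat) : ∀ (L n fb temp : Nat),
    L - n ≤ k →
    ((n % 6 = 0 ∧ fb = 1 ∧ temp % 2 = 0) ∨ (n % 6 = 2 ∧ fb = 3 ∧ temp % 2 = 1)) →
    ∃ m, howkLoop L ((List.range n).map pat) fb 0 temp = (List.range m).map pat ∧ L ≤ m := by
  induction k with
  | zero =>
    intro L n fb temp hk _
    have hL : ¬ ((List.range n).map pat).length < L := by simp; omega
    rw [howkLoop, if_neg hL]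
    exact ⟨n, rfl, by omega⟩
  | succ k ih =>
    intro L n fb temp hk hinv
    by_cases hL : ((List.range n).map pat).length < L
    · rw [howkLoop, if_pos hL]
      simp only [List.length_map, List.length_range] at hL
      rcases hinv with ⟨h6, hfb, ht⟩ | ⟨h6, hfb, ht⟩
      · -- false_block = 1, temp even: append [false, true]
        subst hfb
        rw [if_neg (by omega)]
        have happ : (List.range n).map pat ++ List.replicate (1 + 0) false ++
            List.replicate 1 true = (List.range (n + 2)).map pat := by
          rw [show List.range (n + 2) = List.range n ++ [n, n + 1] by
            rw [List.range_succ, List.range_succ]; simp]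
          simp [pat]
          omega
        rw [happ]
        exact ih L (n + 2) 3 (temp + 1) (by omega) (Or.inr ⟨by omega, rfl, by omega⟩)
      · -- false_block = 3, temp odd: append [false, false, false, true]
        subst hfb
        rw [if_pos (by omega)]
        have happ : (List.range n).map pat ++ List.replicate (3 + 0) false ++
            List.replicate 1 true = (List.range (n + 4)).map pat := by
          rw [show List.range (n + 4) = List.range n ++ [n, n + 1, n + 2, n + 3] by
            rw [List.range_succ, List.range_succ, List.range_succ, List.range_succ]; simp]
          simp [pat]
          refine ⟨by omega, by omega, by omega, by omega⟩
        rw [happ]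
        exact ih L (n + 4) 1 (temp + 1) (by omega) (Or.inl ⟨by omega, rfl, by omega⟩)
    · rw [howkLoop, if_neg hL]
      simp only [List.length_map, List.length_range] at hL
      exact ⟨n, rfl, by omega⟩

-- ===== VERDICT (by name: the statement is the Claim_ definition above) =====
theorem howk_spec : Claim_equal_howk := by
  intro own opp _
  unfold Spec_howk howk howk_alt
  obtain ⟨m, hres, hm⟩ := howkLoop_spec (own.length + 1) (own.length + 1) 0 1 0
    (by omega) (Or.inl ⟨rfl, rfl, rfl⟩)
  simp only [List.range_zero, List.map_nil] at hres
  simp only []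
  rw [hres]
  set n := own.length with hn
  have hcast : ((n : Int) + 1) = ((n + 1 : Nat) : Int) := by push_cast; ring
  rw [hcast, PySem.List.slice_to_natCast]
  rw [← List.map_take, List.take_range, Nat.min_eq_left hm]
  rw [PySem.List.pyGet?_neg_one]
  rw [show List.range (n + 1) = List.range n ++ [n] from List.range_succ]
  rw [List.map_append, show List.map pat [n] = [pat n] from rfl, List.getLast?_concat, Option.getD_some]
  rw [show ((n : Int) % 6) = ((n % 6 : Nat) : Int) from (Int.natCast_mod n 6).symm]
  have h6 : n % 6 < 6 := Nat.mod_lt _ (by norm_num)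
  rw [pat]
  set r := n % 6 with hr
  clear_value r
  interval_cases r <;> decide
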